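-- pv_equiv track=rewrite | github.com/Satyrr/University | AI/Lista3/image_desc_generator.py | image_desc
-- ===== SOURCE A (Python) =====
-- def image_desc(image):
--     image = image.strip().split('\n')
--     image = [list(row.strip()) for row in image]
--
--     rows_desc = []
--     cols_desc = []
--
--     for r in range(len(image)):
--         cur_block = 0
--         rows_desc.append([])
--         for c in range(len(image[0])):
--             if image[r][c] == '.' and cur_block > 0:
--                 rows_desc[r].append(cur_block)
--                 cur_block = 0
--             if image[r][c] == '#':
--                 cur_block += 1
--
--         if cur_block != 0:
--             rows_desc[r].append(cur_block)
--             cur_block = 0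
--         if len(rows_desc[r]) == 0:
--             rows_desc[r].append(0)
--
--     for c in range(len(image[0])):
--         cur_block = 0
--         cols_desc.append([])
--         for r in range(len(image)):
--             if image[r][c] == '.' and cur_block > 0:
--                 cols_desc[c].append(cur_block)
--                 cur_block = 0
--             if image[r][c] == '#':
--                 cur_block += 1
--
--         if cur_block != 0:
--             cols_desc[c].append(cur_block)
--             cur_block = 0
--
--         if len(cols_desc[c]) == 0:
--             cols_desc[c].append(0)
--
--     return rows_desc, cols_desc
-- ===== SOURCE B (Python) =====
-- def image_desc(image):
--     rows = [r.strip() for r in image.strip().split('\n')]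
--     w = len(rows[0])
--     grid = [r[:w] for r in rows]
--
--     def blocks(line):
--         desc = [n for n in (seg.count('#') for seg in line.split('.')) if n > 0]
--         return desc or [0]
--
--     rows_desc = [blocks(r) for r in grid]
--     cols_desc = [blocks(''.join(col)) for col in zip(*grid)]
--     return rows_desc, cols_desc
-- ===== Notes on version B (the rewrite author's own statement) =====
-- stated objective: idiomatic
-- what changed: B replaces A's two nested index loops with a running block counter by a per-line helper that splits the line on '.' and keeps the positive '#'-counts of the segments, maps it over the width-truncated rows, and gets columns by transposing the truncated grid with zip instead of indexing.
import Mathlib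
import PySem

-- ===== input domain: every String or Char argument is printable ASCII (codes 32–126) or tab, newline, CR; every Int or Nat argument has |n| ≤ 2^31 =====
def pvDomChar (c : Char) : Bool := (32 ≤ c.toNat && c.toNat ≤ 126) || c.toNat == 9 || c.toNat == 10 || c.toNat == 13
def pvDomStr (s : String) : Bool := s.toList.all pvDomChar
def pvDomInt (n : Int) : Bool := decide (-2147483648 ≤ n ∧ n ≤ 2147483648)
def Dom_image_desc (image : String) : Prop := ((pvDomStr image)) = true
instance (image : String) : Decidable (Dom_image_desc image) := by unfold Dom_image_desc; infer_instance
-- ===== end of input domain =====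

-- B recomputes the nonogram descriptions by splitting each line on '.' and counting '#'s per
-- segment (a comprehension over split/count) and derives columns by transposing (zip) the
-- width-truncated grid, instead of A's two nested index loops with a running counter; objective: idiomatic.

-- ===== PORT A =====
-- A-side helpers: the per-character body of A's inner loops and the per-line finalisation
def pvStep (st : Int × List Int) (ch : Char) : Int × List Int :=
  let st := if ch = '.' ∧ 0 < st.1 then ((0 : Int), st.2 ++ [st.1]) else st
  if ch = '#' then (st.1 + 1, st.2) else st

def pvFinish (res : Int × List Int) : List Int :=
  let d := if res.1 ≠ 0 then res.2 ++ [res.1] else res.2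
  if d.length = 0 then d ++ [(0 : Int)] else d

def image_desc (image : String) : List (List Int) × List (List Int) :=
  let img : List (List Char) :=
    (PySem.Chars.splitOn (PySem.Chars.strip image.toList) ['\n']).map (fun r => PySem.Chars.strip r)
  let w : Int := ((PySem.List.pyGetD img 0 []).length : Int)   -- len(image[0]) (split always yields ≥ 1 row)
  let rowsDesc := (PySem.List.pyRange 0 (img.length : Int) 1).foldl (fun acc r =>
      let res := (PySem.List.pyRange 0 w 1).foldl (fun st c =>
          pvStep st (PySem.List.pyGetD (PySem.List.pyGetD img r []) c ' '))   -- image[r][c]; in range under Pre_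
        ((0 : Int), ([] : List Int))
      acc ++ [pvFinish res]) []
  let colsDesc := (PySem.List.pyRange 0 w 1).foldl (fun acc c =>
      let res := (PySem.List.pyRange 0 (img.length : Int) 1).foldl (fun st r =>
          pvStep st (PySem.List.pyGetD (PySem.List.pyGetD img r []) c ' '))
        ((0 : Int), ([] : List Int))
      acc ++ [pvFinish res]) []
  (rowsDesc, colsDesc)

-- ===== PORT B =====
-- blocks(line): '#'-counts of the '.'-separated segments, keeping the positive ones; [0] if none
def pvBlocksB (line : List Char) : List Int :=
  let desc := ((PySem.Chars.splitOn line ['.']).map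
      (fun seg => ((PySem.Chars.count seg ['#'] : Nat) : Int))).filter (fun n => 0 < n)
  if desc = [] then [(0 : Int)] else desc

-- zip(*g) ported by hand (PySem's zip is binary): emit a column while every row still has a
-- char — exact for Python's zip over lists; the fuel (first row's length) only makes the
-- same computation total: it runs out exactly when the first row is exhausted
def pvTransposeGo : Nat → List (List Char) → List (List Char)
  | 0, _ => []
  | fuel + 1, g =>
    if g.all (fun x => !x.isEmpty) then
      (g.map (fun x => x.headD ' ')) :: pvTransposeGo fuel (g.map List.tail)
    else []

def pvTranspose (g : List (List Char)) : List (List Char) :=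
  match g with
  | [] => []
  | r :: rs => pvTransposeGo r.length (r :: rs)

def image_desc_alt (image : String) : List (List Int) × List (List Int) :=
  let rows : List (List Char) :=
    (PySem.Chars.splitOn (PySem.Chars.strip image.toList) ['\n']).map (fun r => PySem.Chars.strip r)
  let w : Nat := (rows.headD []).length      -- len(rows[0]); split always yields ≥ 1 row
  let grid := rows.map (fun r => PySem.List.slice r none (some (w : Int)))   -- r[:w]
  (grid.map pvBlocksB, (pvTranspose grid).map pvBlocksB)

-- ===== PRECONDITION & SPEC =====
-- Pre_ excludes ragged inputs where some stripped line is shorter than the first one: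
-- there A raises IndexError (image[r][c] with c beyond the row's end).
def Pre_image_desc (image : String) : Prop :=
  ∀ r ∈ (PySem.Chars.splitOn (PySem.Chars.strip image.toList) ['\n']).map (fun r => PySem.Chars.strip r),
    (((PySem.Chars.splitOn (PySem.Chars.strip image.toList) ['\n']).map
        (fun r => PySem.Chars.strip r)).headD []).length ≤ r.length
instance (image : String) : Decidable (Pre_image_desc image) := by unfold Pre_image_desc; infer_instance

def pvWitness_image_desc : String := "##\n.#"

def Spec_image_desc (image : String) (out : List (List Int) × List (List Int)) : Prop := out = image_desc_alt image
instance (image : String) (out : List (List Int) × List (List Int)) : Decidable (Spec_image_desc image out) := by unfold Spec_image_desc; infer_instance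

-- ===== CLAIM (what is proved, stated in full; the proofs are below) =====
def Claim_equal_image_desc : Prop := ∀ (image : String), Dom_image_desc image → Pre_image_desc image → Spec_image_desc image (image_desc image)
-- ===== LEMMAS AND PROOFS =====

-- the value both per-line computations share: positive '#'-counts of '.'-separated segments,
-- the first segment's count boosted by the running counter cur
def pvSpecBlocks (cur : Int) : List Char → List Int
  | [] => if 0 < cur then [cur] else []
  | c :: t =>
    if c = '.' then (if 0 < cur then [cur] else []) ++ pvSpecBlocks 0 t
    else if c = '#' then pvSpecBlocks (cur + 1) t
    else pvSpecBlocks cur t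

-- structural version of str.split on a one-character separator
def pvNiceSplit (sep : Char) : List Char → List (List Char)
  | [] => [[]]
  | c :: t =>
    if c = sep then [] :: pvNiceSplit sep t
    else match pvNiceSplit sep t with
    | [] => [[c]]
    | s :: r => (c :: s) :: r

theorem pvNiceSplit_ne_nil (sep : Char) (l : List Char) : pvNiceSplit sep l ≠ [] := by
  cases l with
  | nil => simp [pvNiceSplit]
  | cons c t =>
    simp only [pvNiceSplit]
    split
    · simp
    · split <;> simp

theorem pvCountGo (a : Char) (fuel : Nat) (l : List Char) (acc : Nat) (h : l.length ≤ fuel) :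
    PySem.Chars.count.go [a] fuel l acc = acc + l.count a := by
  induction fuel generalizing l acc with
  | zero =>
    have : l = [] := by cases l <;> simp_all
    subst this; simp [PySem.Chars.count.go]
  | succ fuel ih =>
    cases l with
    | nil => simp [PySem.Chars.count.go]
    | cons c t =>
      have hlen : t.length ≤ fuel := by simpa using h
      by_cases hc : c = a
      · have h1 : PySem.Chars.count.go [a] (fuel+1) (c::t) acc
            = PySem.Chars.count.go [a] fuel t (acc+1) := by
          rw [PySem.Chars.count.go]; subst hc; simp [List.isPrefixOf]
        rw [h1, ih t (acc+1) hlen]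
        subst hc
        simp
        omega
      · have hb : (a == c) = false := beq_eq_false_iff_ne.mpr (Ne.symm hc)
        have h1 : PySem.Chars.count.go [a] (fuel+1) (c::t) acc
            = PySem.Chars.count.go [a] fuel t acc := by
          rw [PySem.Chars.count.go]; simp [List.isPrefixOf, hb]
        rw [h1, ih t acc hlen]
        simp [hc]

theorem pvCountSingle (a : Char) (l : List Char) : PySem.Chars.count l [a] = l.count a := by
  simp only [PySem.Chars.count, List.isEmpty_cons, if_neg Bool.false_ne_true]
  rw [pvCountGo a l.length l 0 le_rfl]
  omega

theorem pvSplitGo (sep : Char) (fuel : Nat) (l cur : List Char) (acc : List (List Char))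
    (h : l.length < fuel) :
    PySem.Chars.splitOn.go [sep] fuel l cur acc =
      acc.reverse ++ (match pvNiceSplit sep l with
        | [] => [cur.reverse]
        | s :: r => (cur.reverse ++ s) :: r) := by
  induction fuel generalizing l cur acc with
  | zero => omega
  | succ fuel ih =>
    cases l with
    | nil =>
      simp [PySem.Chars.splitOn.go, pvNiceSplit]
    | cons c t =>
      have hlen : t.length < fuel := by simp at h; omega
      have hne := pvNiceSplit_ne_nil sep t
      by_cases hc : c = sep
      · have h1 : PySem.Chars.splitOn.go [sep] (fuel+1) (c::t) cur acc
            = PySem.Chars.splitOn.go [sep] fuel t [] (cur.reverse :: acc) := by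
          rw [PySem.Chars.splitOn.go]; subst hc; simp [List.isPrefixOf]
        rw [h1, ih t [] (cur.reverse :: acc) hlen]
        cases hs : pvNiceSplit sep t with
        | nil => exact absurd hs hne
        | cons s r => subst hc; simp [pvNiceSplit, hs]
      · have hb : (sep == c) = false := beq_eq_false_iff_ne.mpr (Ne.symm hc)
        have h1 : PySem.Chars.splitOn.go [sep] (fuel+1) (c::t) cur acc
            = PySem.Chars.splitOn.go [sep] fuel t (c :: cur) acc := by
          rw [PySem.Chars.splitOn.go]; simp [List.isPrefixOf, hb]
        rw [h1, ih t (c :: cur) acc hlen]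
        cases hs : pvNiceSplit sep t with
        | nil => exact absurd hs hne
        | cons s r => simp [pvNiceSplit, hc, hs]

theorem pvSplitSingle (sep : Char) (l : List Char) :
    PySem.Chars.splitOn l [sep] = pvNiceSplit sep l := by
  have h := pvSplitGo sep (l.length + 1) l [] [] (by omega)
  simp only [PySem.Chars.splitOn] at *
  rw [h]
  have hne := pvNiceSplit_ne_nil sep l
  cases hs : pvNiceSplit sep l with
  | nil => exact absurd hs hne
  | cons s r => simp

-- A's inner loop over the characters of a line computes pvSpecBlocks
theorem pvFoldFin (l : List Char) (cur : Int) (d : List Int) (h : 0 ≤ cur) :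
    (let p := l.foldl pvStep (cur, d);
     if p.1 ≠ 0 then p.2 ++ [p.1] else p.2) = d ++ pvSpecBlocks cur l := by
  induction l generalizing cur d with
  | nil =>
    simp only [List.foldl_nil, pvSpecBlocks]
    by_cases hc : 0 < cur
    · rw [if_pos (by omega), if_pos hc]
    · have : cur = 0 := by omega
      simp [this]
  | cons c t ih =>
    simp only [List.foldl_cons, pvSpecBlocks]
    by_cases hdot : c = '.'
    · have hnh : c ≠ '#' := by subst hdot; decide
      by_cases hc : 0 < cur
      · have : pvStep (cur, d) c = (0, d ++ [cur]) := by
          simp [pvStep, hdot, hc]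
        rw [this, ih 0 (d ++ [cur]) le_rfl, if_pos hdot, if_pos hc]
        simp
      · have hz : cur = 0 := by omega
        have : pvStep (cur, d) c = (0, d) := by
          simp [pvStep, hdot, hz]
        rw [this, ih 0 d le_rfl, if_pos hdot, if_neg hc]
        simp
    · by_cases hhash : c = '#'
      · have : pvStep (cur, d) c = (cur + 1, d) := by
          simp [pvStep, hhash]
        rw [this, ih (cur + 1) d (by omega), if_neg hdot, if_pos hhash]
      · have : pvStep (cur, d) c = (cur, d) := by
          simp [pvStep, hdot, hhash]
        rw [this, ih cur d h, if_neg hdot, if_neg hhash]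

-- B's split/count comprehension computes pvSpecBlocks
theorem pvBAux (l : List Char) (cur : Int) (h : 0 ≤ cur) (s0 : List Char) (r : List (List Char))
    (hs : pvNiceSplit '.' l = s0 :: r) :
    ((cur + (s0.count '#' : Nat)) :: r.map (fun s => ((s.count '#' : Nat) : Int))).filter
        (fun n => 0 < n) = pvSpecBlocks cur l := by
  induction l generalizing cur s0 r with
  | nil =>
    simp only [pvNiceSplit] at hs
    injection hs with h1 h2
    subst h1; subst h2
    simp only [pvSpecBlocks, List.count_nil, Nat.cast_zero, add_zero, List.map_nil,
      List.filter_cons, List.filter_nil]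
    by_cases hc : 0 < cur
    · simp [hc]
    · simp [hc]
  | cons c t ih =>
    have hne := pvNiceSplit_ne_nil '.' t
    cases ht : pvNiceSplit '.' t with
    | nil => exact absurd ht hne
    | cons s0' r' =>
      simp only [pvNiceSplit, ht] at hs
      by_cases hdot : c = '.'
      · rw [if_pos hdot] at hs
        injection hs with h1 h2
        subst h1; subst h2
        have := ih 0 le_rfl s0' r' ht
        rw [zero_add] at this
        simp only [pvSpecBlocks, if_pos hdot, List.count_nil, Nat.cast_zero, add_zero,
          List.map_cons, List.filter_cons, ← this]
        by_cases hc : 0 < cur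
        · simp [hc]
        · simp [hc]
      · rw [if_neg hdot] at hs
        injection hs with h1 h2
        subst h1; subst h2
        by_cases hhash : c = '#'
        · have hcnt : ((c :: s0').count '#' : Nat) = s0'.count '#' + 1 := by
            subst hhash; simp
          rw [hcnt]
          have := ih (cur + 1) (by omega) s0' r' ht
          simp only [pvSpecBlocks, if_neg hdot, if_pos hhash, ← this]
          congr 2
          push_cast
          ring
        · have hcnt : ((c :: s0').count '#' : Nat) = s0'.count '#' := by
            simp [hhash]
          rw [hcnt]
          have := ih cur h s0' r' ht
          simp only [pvSpecBlocks, if_neg hdot, if_neg hhash, ← this]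

-- the two per-line computations agree
theorem pvBlocksEq (l : List Char) :
    pvBlocksB l = pvFinish (l.foldl pvStep (0, [])) := by
  have hne := pvNiceSplit_ne_nil '.' l
  cases hs : pvNiceSplit '.' l with
  | nil => exact absurd hs hne
  | cons s0 r =>
    have hB := pvBAux l 0 le_rfl s0 r hs
    rw [zero_add] at hB
    have hA := pvFoldFin l 0 [] le_rfl
    simp only [List.nil_append] at hA
    simp only [pvBlocksB, pvFinish, pvSplitSingle, pvCountSingle, hs, List.map_cons,
      List.filter_cons, List.length_eq_zero_iff]
    simp only [List.filter_cons] at hB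
    rw [hB, hA]
    split_ifs with h
    · rw [h]; simp
    · rfl

-- map over range of getD is map
theorem pvMapRangeGetD {α β : Type} (xs : List α) (d : α) (g : α → β) :
    (List.range xs.length).map (fun k => g (xs.getD k d)) = xs.map g := by
  apply List.ext_getElem
  · simp
  · intro i h1 h2
    simp only [List.getElem_map, List.getElem_range]
    rw [List.getD_eq_getElem xs d (by simpa using h2)]

-- transpose of a nonempty rectangular grid, column by column
theorem pvTransposeGoRect (w : Nat) (g : List (List Char)) (hne : g ≠ [])
    (hrect : ∀ r ∈ g, r.length = w) :
    pvTransposeGo w g = (List.range w).map (fun c => g.map (fun row => row.getD c ' ')) := by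
  induction w generalizing g with
  | zero => simp [pvTransposeGo]
  | succ w ih =>
    have hall : g.all (fun x => !x.isEmpty) = true := by
      simp only [List.all_eq_true]
      intro x hx
      have := hrect x hx
      simp only [Bool.not_eq_eq_eq_not, Bool.not_true, List.isEmpty_eq_false_iff]
      exact List.ne_nil_of_length_pos (by omega)
    simp only [pvTransposeGo, if_pos hall]
    rw [ih (g.map List.tail)
      (by simpa using hne)
      (by
        intro x hx
        simp only [List.mem_map] at hx
        obtain ⟨y, hy, rfl⟩ := hx
        have := hrect y hy
        simp [List.length_tail, this])]
    rw [List.range_succ_eq_map]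
    simp only [List.map_cons, List.map_map]
    congr 1
    · apply List.map_congr_left
      intro x hx
      have hx0 : x.length = w + 1 := hrect x hx
      cases x with
      | nil => simp at hx0
      | cons a t => simp
    · apply List.map_congr_left
      intro c _
      simp only [Function.comp_def]
      apply List.map_congr_left
      intro x hx
      have hx0 : x.length = w + 1 := hrect x hx
      cases x with
      | nil => simp at hx0
      | cons a t => simp

theorem pvTransposeRect (w : Nat) (g : List (List Char)) (hne : g ≠ [])
    (hrect : ∀ r ∈ g, r.length = w) :
    pvTranspose g = (List.range w).map (fun c => g.map (fun row => row.getD c ' ')) := by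
  cases g with
  | nil => exact absurd rfl hne
  | cons r rs =>
    have hr : r.length = w := hrect r (by simp)
    simpa [pvTranspose, hr] using
      pvTransposeGoRect w (r :: rs) (by simp) hrect

-- per-row: A's index loop over range(w) = B's blocks of the truncated row
theorem pvRowEq (w : Nat) (r : List Char) (hw : w ≤ r.length) :
    pvFinish ((PySem.List.pyRange 0 (w : Int) 1).foldl
        (fun st c => pvStep st (PySem.List.pyGetD r c ' ')) ((0 : Int), ([] : List Int)))
      = pvBlocksB (r.take w) := by
  have hlen : (r.take w).length = w := by simp [List.length_take]; omega
  have hcongr : (PySem.List.pyRange 0 (w : Int) 1).foldl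
        (fun st c => pvStep st (PySem.List.pyGetD r c ' ')) ((0 : Int), ([] : List Int))
      = (PySem.List.pyRange 0 ((r.take w).length : Int) 1).foldl
        (fun st c => pvStep st (PySem.List.pyGetD (r.take w) c ' ')) ((0 : Int), ([] : List Int)) := by
    rw [hlen]
    apply PySem.List.foldl_congr_mem
    intro st c hc
    have hc' := PySem.List.mem_pyRange_one.mp hc
    have h0 : (0 : Int) ≤ c := hc'.1
    have hcw : c < (w : Int) := hc'.2
    have hcn : c.toNat < w := by omega
    rw [PySem.List.pyGetD_eq_getElem r ' ' h0 (by omega),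
        PySem.List.pyGetD_eq_getElem (r.take w) ' ' h0 (by rw [hlen]; omega)]
    congr 1
    exact (List.getElem_take (xs := r) (j := w) (i := c.toNat)
      (h := by rw [List.length_take]; omega)).symm
  rw [hcongr, PySem.List.foldl_pyRange_zero_pyGetD', ← pvBlocksEq]

theorem pvColListEq (w : Nat) (k : Nat) (hk : k < w) (rows : List (List Char))
    (hpre : ∀ r ∈ rows, w ≤ r.length) :
    rows.map (fun row => PySem.List.pyGetD row (k : Int) ' ')
      = (rows.map (fun r => r.take w)).map (fun row => row.getD k ' ') := by
  rw [List.map_map]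
  apply List.map_congr_left
  intro r hr
  have hwr := hpre r hr
  simp only [Function.comp_def]
  rw [PySem.List.pyGetD_natCast, List.getD_eq_getElem r ' ' (by omega),
      List.getD_eq_getElem (r.take w) ' ' (by simp [List.length_take]; omega)]
  exact (List.getElem_take (xs := r) (j := w) (i := k) (h := by simp [List.length_take]; omega)).symm

theorem pvMapIdx {β : Type} (xs : List (List Char)) (F : List Char → β) :
    (PySem.List.pyRange 0 (xs.length : Int) 1).map (fun r => F (PySem.List.pyGetD xs r [])) = xs.map F := by
  rw [PySem.List.pyRange_zero_nat, List.map_map]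
  have h : ((fun r : Int => F (PySem.List.pyGetD xs r [])) ∘ fun k : Nat => (k : Int))
       = fun k : Nat => F (xs.getD k []) := by
    funext k
    simp [PySem.List.pyGetD_natCast]
  rw [h, pvMapRangeGetD]

theorem pvMain (rows : List (List Char)) (hne : rows ≠ [])
    (hpre : ∀ r ∈ rows, (rows.headD []).length ≤ r.length) :
    ((PySem.List.pyRange 0 (rows.length : Int) 1).foldl (fun acc r =>
        acc ++ [pvFinish ((PySem.List.pyRange 0 ((PySem.List.pyGetD rows 0 []).length : Int) 1).foldl (fun st c =>
          pvStep st (PySem.List.pyGetD (PySem.List.pyGetD rows r []) c ' ')) ((0:Int), ([]:List Int)))]) [],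
      (PySem.List.pyRange 0 ((PySem.List.pyGetD rows 0 []).length : Int) 1).foldl (fun acc c =>
        acc ++ [pvFinish ((PySem.List.pyRange 0 (rows.length : Int) 1).foldl (fun st r =>
          pvStep st (PySem.List.pyGetD (PySem.List.pyGetD rows r []) c ' ')) ((0:Int), ([]:List Int)))]) [])
    = ((rows.map (fun r => PySem.List.slice r none (some ((rows.headD []).length : Int)))).map pvBlocksB,
       (pvTranspose (rows.map (fun r => PySem.List.slice r none (some ((rows.headD []).length : Int))))).map pvBlocksB) := by
  cases rows with
  | nil => exact absurd rfl hne
  | cons r0 rest =>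
  have hget0 : PySem.List.pyGetD (r0 :: rest) (0 : Int) ([] : List Char) = r0 :=
    PySem.List.pyGetD_zero_cons r0 rest []
  rw [hget0]
  simp only [List.headD_cons]
  simp only [List.headD_cons] at hpre
  set R := r0 :: rest with hR
  set w := r0.length with hwdef
  have hgrid : R.map (fun r => PySem.List.slice r none (some (w : Int))) = R.map (fun r => r.take w) := by
    apply List.map_congr_left
    intro r _
    exact PySem.List.slice_to_natCast r w
  have hrect : ∀ x ∈ R.map (fun r => r.take w), x.length = w := by
    intro x hx
    simp only [List.mem_map] at hx
    obtain ⟨y, hy, rfl⟩ := hx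
    have := hpre y hy
    simp [List.length_take]
    omega
  have hgne : R.map (fun r => r.take w) ≠ [] := by simp [hR]
  rw [hgrid]
  simp only [Prod.mk.injEq]
  constructor
  · -- row descriptions
    rw [PySem.List.foldl_append_singleton_eq_map, List.nil_append]
    rw [pvMapIdx R (fun row => pvFinish ((PySem.List.pyRange 0 (w : Int) 1).foldl
        (fun st c => pvStep st (PySem.List.pyGetD row c ' ')) ((0:Int), ([]:List Int))))]
    rw [List.map_map]
    apply List.map_congr_left
    intro r hr
    exact pvRowEq w r (hpre r hr)
  · -- column descriptions
    rw [PySem.List.foldl_append_singleton_eq_map, List.nil_append]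
    rw [pvTransposeRect w (R.map (fun r => r.take w)) hgne hrect]
    rw [PySem.List.pyRange_zero_nat w, List.map_map, List.map_map]
    apply List.map_congr_left
    intro k hk
    have hkw : k < w := List.mem_range.mp hk
    simp only [Function.comp_def]
    rw [PySem.List.foldl_pyRange_zero_pyGetD' R []
        (fun st row => pvStep st (PySem.List.pyGetD row ((k : Nat) : Int) ' ')) ((0:Int), ([]:List Int))]
    rw [← List.foldl_map (f := fun row => PySem.List.pyGetD row ((k : Nat) : Int) ' ') (g := pvStep)]
    rw [pvColListEq w k hkw R hpre]
    exact (pvBlocksEq _).symm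

-- ===== VERDICT (by name: the statement is the Claim_ definition above) =====
theorem image_desc_spec : Claim_equal_image_desc := by
  intro image _ hpre
  unfold Pre_image_desc at hpre
  unfold Spec_image_desc image_desc image_desc_alt
  have hne : ((PySem.Chars.splitOn (PySem.Chars.strip image.toList) ['\n']).map
      (fun r => PySem.Chars.strip r)) ≠ [] := by
    rw [pvSplitSingle]
    intro h
    exact pvNiceSplit_ne_nil '\n' _ (List.map_eq_nil_iff.mp h)
  exact pvMain _ hne hpre
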